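-- pv_equiv track=rewrite | github.com/Celine-Carvalho-2105/SDK_documentation2.0 | agents/analyzer.py | _get_key_files
-- ===== SOURCE A (Python) =====
-- from typing import List, Dict, Optional
--
-- def _get_key_files(files: List[Dict]) -> List[Dict]:
--     """Prioritize entry points, configs, and READMEs."""
--     priority = []
--     secondary = []
--     for f in files:
--         name = f["path"].lower()
--         if any(kw in name for kw in ["readme", "main", "app", "index", "setup", "config", "__init__"]):
--             priority.append(f)
--         else:
--             secondary.append(f)
--     return (priority + secondary)[:12]
-- ===== SOURCE B (Python) =====
-- def _get_key_files(files):
--     """Prioritize entry points, configs, and READMEs."""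
--     def is_priority(f):
--         name = f["path"].lower()
--         return any(kw in name for kw in ["readme", "main", "app", "index", "setup", "config", "__init__"])
--     return sorted(files, key=lambda f: not is_priority(f))[:12]
-- ===== Notes on version B (the rewrite author's own statement) =====
-- stated objective: idiomatic
-- what changed: Replaces the explicit two-accumulator partition loop with a single stable sort keyed on the boolean 'not is_priority' (stability preserves relative order) followed by a [:12] slice.
import Mathlib
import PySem

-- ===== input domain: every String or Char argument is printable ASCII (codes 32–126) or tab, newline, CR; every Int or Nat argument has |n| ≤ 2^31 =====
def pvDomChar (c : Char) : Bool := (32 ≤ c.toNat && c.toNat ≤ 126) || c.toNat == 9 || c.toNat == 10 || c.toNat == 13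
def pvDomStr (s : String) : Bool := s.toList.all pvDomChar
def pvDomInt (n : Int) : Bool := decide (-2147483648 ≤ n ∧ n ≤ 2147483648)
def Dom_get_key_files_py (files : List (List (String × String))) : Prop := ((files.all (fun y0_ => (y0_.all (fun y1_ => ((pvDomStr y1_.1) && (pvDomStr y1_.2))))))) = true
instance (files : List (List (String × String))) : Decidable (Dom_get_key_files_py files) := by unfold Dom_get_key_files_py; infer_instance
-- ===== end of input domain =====

-- B replaces A's two-accumulator partition loop with a single stable sort on the
-- boolean key `not is_priority` followed by a [:12] slice (objective: idiomatic).


-- ===== PORT A =====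
-- f["path"]: first match in the association list; exact under Pre_ (the key is
-- present); Python raises KeyError otherwise.
def pyPath (f : List (String × String)) : String :=
  ((f.find? (fun p => p.1 == "path")).map Prod.snd).getD ""

-- name = f["path"].lower(); any(kw in name for kw in [...]) — shared verbatim by A and B
def isPriority (f : List (String × String)) : Bool :=
  let name := PySem.Str.lower (pyPath f)
  (["readme", "main", "app", "index", "setup", "config", "__init__"]).any
    (fun kw => PySem.Str.isIn kw name)

def get_key_files_py (files : List (List (String × String))) : List (List (String × String)) :=
  let acc := files.foldl
    (fun (acc : List (List (String × String)) × List (List (String × String))) f =>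
      if isPriority f then (acc.1 ++ [f], acc.2) else (acc.1, acc.2 ++ [f]))
    ([], [])
  PySem.List.slice (acc.1 ++ acc.2) none (some 12)

-- ===== PORT B =====
def get_key_files_py_alt (files : List (List (String × String))) : List (List (String × String)) :=
  PySem.List.slice (PySem.List.sorted files (fun f => !isPriority f) false) none (some 12)

-- ===== PRECONDITION & SPEC =====
-- Pre_: every dict carries the key "path"; on a dict without it A raises KeyError.
def Pre_get_key_files_py (files : List (List (String × String))) : Prop :=
  (files.all (fun f => (f.map Prod.fst).contains "path")) = true
instance (files : List (List (String × String))) : Decidable (Pre_get_key_files_py files) := by unfold Pre_get_key_files_py; infer_instance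
def pvWitness_get_key_files_py : (List (List (String × String))) := [[("path", "main.py")], [("path", "zz.txt")]]

def Spec_get_key_files_py (files : List (List (String × String))) (out : List (List (String × String))) : Prop := out = get_key_files_py_alt files
instance (files : List (List (String × String))) (out : List (List (String × String))) : Decidable (Spec_get_key_files_py files out) := by unfold Spec_get_key_files_py; infer_instance

-- ===== CLAIM (what is proved, stated in full; the proofs are below) =====
def Claim_equal_get_key_files_py : Prop := ∀ (files : List (List (String × String))), Dom_get_key_files_py files → Pre_get_key_files_py files → Spec_get_key_files_py files (get_key_files_py files)

-- ===== LEMMAS AND PROOFS =====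

-- an element with a true key is inserted at the very end
lemma insertBy_key_true {α : Type} (K : α → Bool) (x : α) (hx : K x = true) (l : List α) :
    PySem.List.insertBy (fun a b => decide (K a < K b)) x l = l ++ [x] := by
  induction l with
  | nil => rfl
  | cons y ys ih =>
      simp only [PySem.List.insertBy, hx]
      cases hy : K y <;> simp_all

-- an element with a false key is inserted between the false block and the true block
lemma insertBy_key_false {α : Type} (K : α → Bool) (x : α) (hx : K x = false)
    (fs ts : List α) (hfs : ∀ y ∈ fs, K y = false) (hts : ∀ y ∈ ts, K y = true) :
    PySem.List.insertBy (fun a b => decide (K a < K b)) x (fs ++ ts) = fs ++ x :: ts := by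
  induction fs with
  | nil =>
      cases ts with
      | nil => rfl
      | cons t ts' =>
          have ht : K t = true := hts t (by simp)
          simp [PySem.List.insertBy, hx, ht]
  | cons y ys ih =>
      have hy : K y = false := hfs y (by simp)
      simp only [List.cons_append, PySem.List.insertBy, hx, hy]
      simp only [decide_eq_true_eq]
      rw [if_neg (by simp)]
      rw [ih (fun z hz => hfs z (by simp [hz]))]

-- the insertion-sort fold on a boolean key keeps a (false-block ++ true-block) shape
lemma sortedBool_fold {α : Type} (K : α → Bool) :
    ∀ (xs fs ts : List α), (∀ y ∈ fs, K y = false) → (∀ y ∈ ts, K y = true) →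
    xs.foldl (fun acc x => PySem.List.insertBy (fun a b => decide (K a < K b)) x acc) (fs ++ ts)
      = (fs ++ xs.filter (fun x => !K x)) ++ (ts ++ xs.filter K) := by
  intro xs
  induction xs with
  | nil => intro fs ts _ _; simp
  | cons x xs ih =>
      intro fs ts hfs hts
      simp only [List.foldl_cons]
      cases hx : K x with
      | true =>
          have hts' : ∀ y ∈ ts ++ [x], K y = true := by
            intro y hy
            rcases List.mem_append.1 hy with h | h
            · exact hts y h
            · simp at h; simpa [h] using hx
          rw [insertBy_key_true K x hx, List.append_assoc, ih fs (ts ++ [x]) hfs hts']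
          simp [hx]
      | false =>
          have hfs' : ∀ y ∈ fs ++ [x], K y = false := by
            intro y hy
            rcases List.mem_append.1 hy with h | h
            · exact hfs y h
            · simp at h; simpa [h] using hx
          rw [insertBy_key_false K x hx fs ts hfs hts]
          have hsh : fs ++ x :: ts = (fs ++ [x]) ++ ts := by simp
          rw [hsh, ih (fs ++ [x]) ts hfs' hts]
          simp [hx]

-- B's stable sort by a boolean key IS the partition
lemma sorted_bool_eq_partition {α : Type} (K : α → Bool) (xs : List α) :
    PySem.List.sorted xs K false = xs.filter (fun x => !K x) ++ xs.filter K := by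
  have := sortedBool_fold K xs [] [] (by simp) (by simp)
  simpa [PySem.List.sorted] using this

-- A's pair-accumulator loop computes the two filters
lemma foldA_eq_filters {α : Type} (p : α → Bool) :
    ∀ (xs : List α) (ps ss : List α),
    xs.foldl (fun (acc : List α × List α) x =>
        if p x then (acc.1 ++ [x], acc.2) else (acc.1, acc.2 ++ [x])) (ps, ss)
      = (ps ++ xs.filter p, ss ++ xs.filter (fun x => !p x)) := by
  intro xs
  induction xs with
  | nil => intro ps ss; simp
  | cons x xs ih =>
      intro ps ss
      cases hx : p x <;> simp [hx, ih]

-- ===== VERDICT (by name: the statement is the Claim_ definition above) =====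
theorem get_key_files_py_spec : Claim_equal_get_key_files_py := by
  unfold Claim_equal_get_key_files_py
  intro files _ _
  unfold Spec_get_key_files_py get_key_files_py get_key_files_py_alt
  rw [sorted_bool_eq_partition, foldA_eq_filters]
  simp [Bool.not_not]
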